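-- pv_equiv track=rewrite | github.com/devfort/wildlifenearyou | zoo/places/views.py | prettify_days
-- ===== SOURCE A (Python) =====
-- def prettify_days(daynums):
--     days_of_week = ('Sun', 'Mon', 'Tue', 'Wed', 'Thu', 'Fri', 'Sat')
--     in_range = False
--     ranges = {}
--     for d in range(7):
--         if d in daynums and not in_range:
--             in_range = True
--             range_start = d
--         if d not in daynums and in_range:
--             in_range = False
--             ranges[range_start] = d-1
--     if in_range:
--             if 0 in ranges:
--                 ranges[range_start] = ranges[0]
--                 del ranges[0]
--             else:
--                 ranges[range_start] = d
--
--     out = []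
--     for start in sorted(ranges):
--         end = ranges[start]
--         if start == end:
--             out.append( days_of_week[start] )
--         else:
--             out.append( u"%s\u2013%s" % (days_of_week[start], days_of_week[end] ) )
--
--     return ', '.join(out)
-- ===== SOURCE B (Python) =====
-- def prettify_days(daynums):
--     names = ('Sun', 'Mon', 'Tue', 'Wed', 'Thu', 'Fri', 'Sat')
--     present = [d for d in range(7) if d in daynums]
--     if not present:
--         return ''
--     if len(present) == 7:
--         return u'Sun\u2013Sat'
--     parts = []
--     for s in range(7):
--         if s in present and (s - 1) % 7 not in present:
--             e = s
--             while (e + 1) % 7 in present: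
--                 e = (e + 1) % 7
--             parts.append(names[s] if s == e else u'%s\u2013%s' % (names[s], names[e]))
--     return ', '.join(parts)
-- ===== Notes on version B (the rewrite author's own statement) =====
-- stated objective: alternative
-- what changed: Replaces A's linear state machine (flag + start->end dict filled left to right, wraparound fixed up afterwards by merging the dict entry for 0, then sorted keys) by a circular-run algorithm: a day s starts a run iff s is present and (s-1)%7 is absent, the run's end is found by walking forward mod 7, and the full week is the single case with no circular start; no dict, no merge step, no sort.
import Mathlib
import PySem

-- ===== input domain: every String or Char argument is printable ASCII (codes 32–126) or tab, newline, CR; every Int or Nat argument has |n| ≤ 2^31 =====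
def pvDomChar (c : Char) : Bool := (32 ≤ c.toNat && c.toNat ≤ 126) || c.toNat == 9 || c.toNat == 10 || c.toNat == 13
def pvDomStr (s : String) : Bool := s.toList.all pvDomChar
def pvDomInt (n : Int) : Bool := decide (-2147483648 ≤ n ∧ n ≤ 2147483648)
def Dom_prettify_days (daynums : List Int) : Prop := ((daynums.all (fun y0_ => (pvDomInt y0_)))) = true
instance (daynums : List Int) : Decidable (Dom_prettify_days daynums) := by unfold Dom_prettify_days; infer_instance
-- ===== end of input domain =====

-- B finds runs circularly: s starts a run iff s is present and (s-1)%7 absent, the end is found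
-- by walking forward mod 7, full week is the one case with no circular start; objective: alternative.

-- ===== PORT A =====
def pvDow : List String := ["Sun", "Mon", "Tue", "Wed", "Thu", "Fri", "Sat"]

-- one iteration of A's 'for d in range(7)' loop; state = (in_range, ranges, range_start)
def pvAStep (daynums : List Int) (st : Bool × PySem.Dict Int Int × Int) (d : Int) :
    Bool × PySem.Dict Int Int × Int :=
  let p : Bool × Int :=
    if daynums.contains d && !st.1 then (true, d) else (st.1, st.2.2)
  if !(daynums.contains d) && p.1 then (false, st.2.1.insert p.2 (d - 1), p.2)
  else (p.1, st.2.1, p.2)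

-- A's code after the loop; the Python variable d equals 6 there (range(7) is non-empty)
def pvAFinish (st : Bool × PySem.Dict Int Int × Int) : String :=
  let ranges :=
    if st.1 then
      if st.2.1.contains 0 then (st.2.1.insert st.2.2 (st.2.1.getD 0 0)).erase 0
      else st.2.1.insert st.2.2 6
    else st.2.1
  PySem.Str.join ", "
    ((PySem.List.sorted ranges.keys (fun x => x) false).foldl
      (fun out start =>
        let e := ranges.getD start 0
        if start == e then out ++ [PySem.List.pyGetD pvDow start ""]
        else out ++ [PySem.List.pyGetD pvDow start "" ++ "–" ++ PySem.List.pyGetD pvDow e ""])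
      [])

def prettify_days (daynums : List Int) : String :=
  pvAFinish ((PySem.List.pyRange 0 7 1).foldl (pvAStep daynums) (false, PySem.Dict.empty, 0))

-- ===== PORT B =====
-- the 'while (e+1)%7 in present' walk; fuel 7 suffices: present misses at least one of the 7 days
def pvWalk (present : List Int) : Nat → Int → Int
  | 0, e => e
  | n + 1, e =>
      if present.contains (PySem.Int.mod (e + 1) 7) then pvWalk present n (PySem.Int.mod (e + 1) 7)
      else e

def prettify_days_alt (daynums : List Int) : String :=
  let present := (PySem.List.pyRange 0 7 1).filter (fun d => daynums.contains d)
  if present.isEmpty then ""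
  else if present.length == 7 then "Sun–Sat"
  else
    PySem.Str.join ", "
      ((PySem.List.pyRange 0 7 1).foldl
        (fun parts s =>
          if present.contains s && !(present.contains (PySem.Int.mod (s - 1) 7)) then
            let e := pvWalk present 7 s
            parts ++ [if s == e then PySem.List.pyGetD pvDow s ""
                      else PySem.List.pyGetD pvDow s "" ++ "–" ++ PySem.List.pyGetD pvDow e ""]
          else parts)
        [])

-- ===== PRECONDITION & SPEC =====
def Spec_prettify_days (daynums : List Int) (out : String) : Prop := out = prettify_days_alt daynums
instance (daynums : List Int) (out : String) : Decidable (Spec_prettify_days daynums out) := by unfold Spec_prettify_days; infer_instance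

-- ===== CLAIM (what is proved, stated in full; the proofs are below) =====
def Claim_equal_prettify_days : Prop := ∀ (daynums : List Int), Dom_prettify_days daynums → Spec_prettify_days daynums (prettify_days daynums)

-- ===== LEMMAS AND PROOFS =====

-- canonical representative of daynums: which of the days 0..6 are present, as nested if/cons
def pvRep7 (b0 b1 b2 b3 b4 b5 b6 : Bool) : List Int :=
  let t6 : List Int := if b6 then [6] else []
  let t5 := if b5 then 5 :: t6 else t6
  let t4 := if b4 then 4 :: t5 else t5
  let t3 := if b3 then 3 :: t4 else t4
  let t2 := if b2 then 2 :: t3 else t3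
  let t1 := if b1 then 1 :: t2 else t2
  if b0 then 0 :: t1 else t1

def pvRep (xs : List Int) : List Int :=
  (PySem.List.pyRange 0 7 1).filter (fun d => xs.contains d)

lemma pvRange7 : PySem.List.pyRange 0 7 1 = [0, 1, 2, 3, 4, 5, 6] := by decide

lemma pvRep_eq (xs : List Int) :
    pvRep xs = pvRep7 (xs.contains 0) (xs.contains 1) (xs.contains 2) (xs.contains 3)
      (xs.contains 4) (xs.contains 5) (xs.contains 6) := by
  simp only [pvRep, pvRange7, List.filter_cons, List.filter_nil, pvRep7]

lemma pvRep_contains (xs : List Int) (d : Int) (hd : d ∈ PySem.List.pyRange 0 7 1) :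
    (pvRep xs).contains d = xs.contains d := by
  cases hc : xs.contains d with
  | true =>
    have hm : d ∈ xs := by simpa using hc
    have : d ∈ pvRep xs := by
      simp [pvRep, List.mem_filter, hd, hm]
    simpa using this
  | false =>
    have hm : d ∉ xs := by simpa using hc
    have : d ∉ pvRep xs := by
      simp [pvRep, List.mem_filter, hm]
    simpa using this

lemma pvA_congr (xs ys : List Int)
    (h : ∀ d ∈ PySem.List.pyRange 0 7 1, xs.contains d = ys.contains d) :
    prettify_days xs = prettify_days ys := by
  unfold prettify_days
  exact congrArg pvAFinish (PySem.List.foldl_congr_mem _ (pvAStep xs) (pvAStep ys) _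
    (fun acc d hd => by simp only [pvAStep, h d hd]))

lemma pvB_congr (xs ys : List Int)
    (h : ∀ d ∈ PySem.List.pyRange 0 7 1, xs.contains d = ys.contains d) :
    prettify_days_alt xs = prettify_days_alt ys := by
  unfold prettify_days_alt
  rw [List.filter_congr h]

set_option maxHeartbeats 4000000 in
lemma pvKey : ∀ b0 b1 b2 b3 b4 b5 b6 : Bool,
    prettify_days (pvRep7 b0 b1 b2 b3 b4 b5 b6) = prettify_days_alt (pvRep7 b0 b1 b2 b3 b4 b5 b6) := by
  decide

-- ===== VERDICT (by name: the statement is the Claim_ definition above) =====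
theorem prettify_days_spec : Claim_equal_prettify_days := by
  intro xs _
  show prettify_days xs = prettify_days_alt xs
  calc prettify_days xs = prettify_days (pvRep xs) :=
        pvA_congr xs (pvRep xs) (fun d hd => (pvRep_contains xs d hd).symm)
    _ = prettify_days_alt (pvRep xs) := by rw [pvRep_eq]; exact pvKey _ _ _ _ _ _ _
    _ = prettify_days_alt xs :=
        pvB_congr (pvRep xs) xs (fun d hd => pvRep_contains xs d hd)
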